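-- pv_equiv track=rewrite | github.com/ParamPatel14/RessearchGate | backend/app/api/resume.py | parse_skills_global
-- ===== SOURCE A (Python) =====
-- def parse_skills_global(text):
--     # Fallback when there is no explicit "Skills" section
--     # Aggregate all "Technologies used:" lines and any "Skills:" lines
--     tech_lines = []
--     for line in text.split('\n'):
--         s = line.strip()
--         low = s.lower()
--         if low.startswith('technologies used') or low.startswith('skills:') or low.startswith('tech stack'):
--             parts = s.split(':', 1)
--             if len(parts) == 2:
--                 tech_lines.append(parts[1].strip())
--     # Combine and split by commas
--     combined = ", ".join(tech_lines)
--     parts = [p.strip() for p in combined.split(',') if p.strip()]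
--     primary = ", ".join(parts[:5])
--     tools = ", ".join(parts[5:])
--     return {"primary": primary, "tools": tools}
-- ===== SOURCE B (Python) =====
-- def parse_skills_global(text):
--     # Stream each skill token straight into the two result strings, keeping a
--     # running count and two incrementally joined strings; no token list is
--     # ever built, sliced or re-joined.
--     primary, tools, n = "", "", 0
--     for line in text.split('\n'):
--         s = line.strip()
--         low = s.lower()
--         if (low.startswith('technologies used') or low.startswith('skills:')
--                 or low.startswith('tech stack')) and ':' in s:
--             for tok in s.split(':', 1)[1].strip().split(','):
--                 t = tok.strip()
--                 if t:
--                     if n < 5: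
--                         primary = t if n == 0 else primary + ", " + t
--                     else:
--                         tools = t if n == 5 else tools + ", " + t
--                     n += 1
--     return {"primary": primary, "tools": tools}
-- ===== Notes on version B (the rewrite author's own statement) =====
-- stated objective: alternative
-- what changed: B streams tokens directly into the two output strings with a running count and incremental separator concatenation, maintaining no intermediate line list or token list at all, where A collects matching line tails, rejoins them into one string, re-splits that into a filtered token list and slices/joins the list.
import Mathlib
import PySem

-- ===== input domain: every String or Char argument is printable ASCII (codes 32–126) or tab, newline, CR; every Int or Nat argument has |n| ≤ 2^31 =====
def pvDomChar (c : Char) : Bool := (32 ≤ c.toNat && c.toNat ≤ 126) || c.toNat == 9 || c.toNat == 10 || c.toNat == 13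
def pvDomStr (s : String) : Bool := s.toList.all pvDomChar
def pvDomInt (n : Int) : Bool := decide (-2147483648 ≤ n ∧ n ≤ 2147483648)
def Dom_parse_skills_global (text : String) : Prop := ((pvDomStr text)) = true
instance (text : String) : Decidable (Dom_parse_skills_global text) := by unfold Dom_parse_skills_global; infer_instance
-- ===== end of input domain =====

-- B streams each token straight into the two output strings (running count,
-- incremental ", " concatenation) instead of A's collect / rejoin / re-split /
-- slice-and-join pipeline; objective: alternative.

-- ===== PORT A =====
def parse_skills_global (text : String) : List (String × String) :=
  let tech_lines : List (List Char) :=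
    (PySem.Chars.splitOn text.toList ['\n']).foldl (fun acc line =>
      let s := PySem.Chars.strip line
      let low := PySem.Chars.lower s
      if PySem.Chars.startswith low ("technologies used".toList)
          || PySem.Chars.startswith low ("skills:".toList)
          || PySem.Chars.startswith low ("tech stack".toList) then
        let parts := PySem.Chars.splitOnMax s [':'] 1
        if parts.length == 2 then
          acc ++ [PySem.Chars.strip (parts.getD 1 [])]   -- parts[1]: in range since length == 2
        else acc
      else acc) []
  let combined := PySem.Chars.join (", ".toList) tech_lines
  -- [p.strip() for p in combined.split(',') if p.strip()]
  let parts := ((PySem.Chars.splitOn combined [',']).map PySem.Chars.strip).filter (fun p => p ≠ [])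
  let primary := PySem.Chars.join (", ".toList) (PySem.List.slice parts none (some 5))
  let tools := PySem.Chars.join (", ".toList) (PySem.List.slice parts (some 5) none)
  [("primary", String.ofList primary), ("tools", String.ofList tools)]

-- ===== PORT B =====
-- state = (primary, tools, n), updated token by token as in Source B
def parse_skills_global_alt (text : String) : List (String × String) :=
  let st : List Char × List Char × Nat :=
    (PySem.Chars.splitOn text.toList ['\n']).foldl (fun st line =>
      let s := PySem.Chars.strip line
      let low := PySem.Chars.lower s
      if (PySem.Chars.startswith low ("technologies used".toList)
          || PySem.Chars.startswith low ("skills:".toList)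
          || PySem.Chars.startswith low ("tech stack".toList))
          && PySem.Chars.isIn [':'] s then
        -- s.split(':', 1)[1]: index in range because ':' in s
        (PySem.Chars.splitOn
            (PySem.Chars.strip ((PySem.Chars.splitOnMax s [':'] 1).getD 1 [])) [',']).foldl
          (fun st tok =>
            let t := PySem.Chars.strip tok
            if t ≠ [] then
              if st.2.2 < 5 then
                (if st.2.2 == 0 then t else st.1 ++ ", ".toList ++ t, st.2.1, st.2.2 + 1)
              else
                (st.1, if st.2.2 == 5 then t else st.2.1 ++ ", ".toList ++ t, st.2.2 + 1)
            else st) st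
      else st) ([], [], 0)
  [("primary", String.ofList st.1), ("tools", String.ofList st.2.1)]

-- ===== PRECONDITION & SPEC =====
def Spec_parse_skills_global (text : String) (out : List (String × String)) : Prop := out = parse_skills_global_alt text
instance (text : String) (out : List (String × String)) : Decidable (Spec_parse_skills_global text out) := by unfold Spec_parse_skills_global; infer_instance

-- ===== CLAIM (what is proved, stated in full; the proofs are below) =====
def Claim_equal_parse_skills_global : Prop := ∀ (text : String), Dom_parse_skills_global text → Spec_parse_skills_global text (parse_skills_global text)

-- ===== LEMMAS AND PROOFS =====

-- simple structural single-character split (no fuel), used to reason about both ports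
def splitC (c : Char) : List Char → List (List Char)
  | [] => [[]]
  | a :: rest =>
    if a = c then [] :: splitC c rest
    else (a :: (splitC c rest).headI) :: (splitC c rest).tail

theorem splitC_ne_nil (c : Char) (l : List Char) : splitC c l ≠ [] := by
  cases l with
  | nil => simp [splitC]
  | cons a rest => simp only [splitC]; split <;> simp

theorem headI_cons_tail {α : Type} [Inhabited α] (l : List α) (h : l ≠ []) : l.headI :: l.tail = l := by
  cases l with | nil => exact absurd rfl h | cons a t => rfl

theorem splitOn_go_eq (c : Char) :
    ∀ fuel (l cur : List Char) (acc : List (List Char)), l.length ≤ fuel →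
      PySem.Chars.splitOn.go [c] fuel l cur acc =
        acc.reverse ++ (cur.reverse ++ (splitC c l).headI) :: (splitC c l).tail := by
  intro fuel
  induction fuel with
  | zero =>
    intro l cur acc h
    have hl : l = [] := List.length_eq_zero_iff.mp (Nat.le_zero.mp h)
    subst hl
    rw [PySem.Chars.splitOn.go]; simp [splitC]
  | succ fuel ih =>
    intro l cur acc h
    cases l with
    | nil =>
      rw [PySem.Chars.splitOn.go]
      all_goals simp [splitC]
    | cons a rest =>
      rw [PySem.Chars.splitOn.go]
      by_cases hac : a = c
      · subst hac
        simp only [List.isPrefixOf, beq_self_eq_true, Bool.and_true, if_pos, List.length_cons,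
          List.drop_succ_cons, List.drop_zero, List.length_nil]
        rw [ih rest [] (cur.reverse :: acc) (by simpa using h)]
        simp [splitC, headI_cons_tail _ (splitC_ne_nil a rest)]
      · have hca : (c == a) = false := beq_eq_false_iff_ne.mpr (Ne.symm hac)
        simp only [List.isPrefixOf, hca, Bool.false_and, Bool.false_eq_true]
        rw [ih rest (a :: cur) acc (by simpa using h)]
        simp [splitC, hac]

theorem splitOn_single (c : Char) (s : List Char) :
    PySem.Chars.splitOn s [c] = splitC c s := by
  rw [PySem.Chars.splitOn, splitOn_go_eq c _ s [] [] (Nat.le_succ _)]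
  simp [headI_cons_tail _ (splitC_ne_nil c s)]

theorem splitOnMax_go_zero (c : Char) :
    ∀ fuel (l cur : List Char) (acc : List (List Char)),
      PySem.Chars.splitOnMax.go [c] fuel 0 l cur acc = acc.reverse ++ [cur.reverse ++ l] := by
  intro fuel l cur acc
  cases fuel with
  | zero => rw [PySem.Chars.splitOnMax.go]; simp
  | succ fuel =>
    cases l with
    | nil => rw [PySem.Chars.splitOnMax.go]; all_goals simp
    | cons a rest => rw [PySem.Chars.splitOnMax.go]; all_goals simp

theorem splitOnMax_go_one (c : Char) :
    ∀ fuel (l cur : List Char) (acc : List (List Char)), l.length ≤ fuel →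
      PySem.Chars.splitOnMax.go [c] fuel 1 l cur acc =
        if c ∈ l then
          acc.reverse ++ [cur.reverse ++ l.takeWhile (· ≠ c), (l.dropWhile (· ≠ c)).tail]
        else acc.reverse ++ [cur.reverse ++ l] := by
  intro fuel
  induction fuel with
  | zero =>
    intro l cur acc h
    have hl : l = [] := List.length_eq_zero_iff.mp (Nat.le_zero.mp h)
    subst hl
    rw [PySem.Chars.splitOnMax.go]; simp
  | succ fuel ih =>
    intro l cur acc h
    cases l with
    | nil =>
      rw [PySem.Chars.splitOnMax.go]
      all_goals simp
    | cons a rest =>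
      rw [PySem.Chars.splitOnMax.go]
      by_cases hac : a = c
      · subst hac
        simp only [List.isPrefixOf, beq_self_eq_true, Bool.and_true, List.length_cons,
          List.drop_succ_cons, List.drop_zero, if_pos, one_ne_zero, List.length_nil]
        rw [splitOnMax_go_zero]
        simp [List.mem_cons, List.takeWhile, List.dropWhile]
      · have hca : (c == a) = false := beq_eq_false_iff_ne.mpr (Ne.symm hac)
        simp only [List.isPrefixOf, hca, Bool.false_and, Bool.false_eq_true, one_ne_zero]
        rw [ih rest (a :: cur) acc (by simpa using h)]
        by_cases hm : c ∈ rest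
        · simp [hm, hac, List.takeWhile, List.dropWhile]
        · simp [hm, Ne.symm hac]

theorem splitOnMax_one (c : Char) (s : List Char) :
    PySem.Chars.splitOnMax s [c] 1 =
      if c ∈ s then [s.takeWhile (· ≠ c), (s.dropWhile (· ≠ c)).tail] else [s] := by
  have h0 : PySem.Chars.splitOnMax s [c] 1 = PySem.Chars.splitOnMax.go [c] (s.length + 1) ((1:Int)).toNat s [] [] := by
    rw [PySem.Chars.splitOnMax]; norm_num
  rw [h0, show ((1:Int)).toNat = 1 from rfl, splitOnMax_go_one c _ s [] [] (Nat.le_succ _)]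
  split <;> simp

theorem isIn_single (c : Char) (s : List Char) :
    PySem.Chars.isIn [c] s = true ↔ c ∈ s := by
  rw [PySem.Chars.isIn_iff_infix]
  constructor
  · rintro ⟨x, y, hxy⟩
    subst hxy; simp
  · intro hm
    obtain ⟨x, y, hxy⟩ := List.append_of_mem hm
    exact ⟨x, y, by simp [hxy]⟩

-- the strip-and-filter tokenisation both programs apply to comma-split text
def tokensOf (l : List Char) : List (List Char) :=
  ((splitC ',' l).map PySem.Chars.strip).filter (fun p => p ≠ [])

theorem splitC_append_sep (c : Char) (x y : List Char) :
    splitC c (x ++ c :: y) = splitC c x ++ splitC c y := by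
  induction x with
  | nil => simp [splitC]
  | cons a x ih =>
    by_cases hac : a = c
    · subst hac; simp [splitC, ih]
    · obtain ⟨p, ps, hps⟩ := List.exists_cons_of_ne_nil (splitC_ne_nil c x)
      simp [List.cons_append, splitC, if_neg hac, ih, hps]

theorem tokensOf_append_sep (x y : List Char) :
    tokensOf (x ++ ',' :: y) = tokensOf x ++ tokensOf y := by
  simp [tokensOf, splitC_append_sep]

theorem strip_space_cons (h : List Char) : PySem.Chars.strip (' ' :: h) = PySem.Chars.strip h := by
  simp [PySem.Chars.strip, PySem.Chars.lstrip, List.dropWhile]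
  rfl

theorem tokensOf_space_cons (y : List Char) : tokensOf (' ' :: y) = tokensOf y := by
  obtain ⟨p, ps, hps⟩ := List.exists_cons_of_ne_nil (splitC_ne_nil ',' y)
  simp [tokensOf, splitC, hps, strip_space_cons]

theorem tokensOf_nil : tokensOf [] = [] := by
  simp [tokensOf, splitC]
  rfl

theorem tokensOf_join (ts : List (List Char)) :
    tokensOf (PySem.Chars.join (", ".toList) ts) = ts.flatMap tokensOf := by
  induction ts with
  | nil => simp [PySem.Chars.join, List.intercalate, tokensOf_nil]
  | cons t ts ih =>
    cases ts with
    | nil => simp [PySem.Chars.join, List.intercalate]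
    | cons u us =>
      rw [PySem.Chars.join_cons_cons]
      have : t ++ ", ".toList ++ PySem.Chars.join (", ".toList) (u :: us)
          = t ++ ',' :: (' ' :: PySem.Chars.join (", ".toList) (u :: us)) := by
        simp [show ", ".toList = [',', ' '] from rfl]
      rw [this, tokensOf_append_sep, tokensOf_space_cons, ih]
      simp

-- the common line condition and each side's per-line data
def lineCond (line : List Char) : Bool :=
  let low := PySem.Chars.lower (PySem.Chars.strip line)
  PySem.Chars.startswith low ("technologies used".toList)
    || PySem.Chars.startswith low ("skills:".toList)
    || PySem.Chars.startswith low ("tech stack".toList)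

def fA (line : List Char) : List (List Char) :=
  if lineCond line then
    let parts := PySem.Chars.splitOnMax (PySem.Chars.strip line) [':'] 1
    if parts.length == 2 then [PySem.Chars.strip (parts.getD 1 [])] else []
  else []

def gB (line : List Char) : List (List Char) :=
  if lineCond line && PySem.Chars.isIn [':'] (PySem.Chars.strip line) then
    tokensOf (PySem.Chars.strip ((PySem.Chars.splitOnMax (PySem.Chars.strip line) [':'] 1).getD 1 []))
  else []

theorem fA_tokens (line : List Char) : (fA line).flatMap tokensOf = gB line := by
  unfold fA gB
  by_cases hC : lineCond line
  · by_cases hm : ':' ∈ PySem.Chars.strip line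
    · have hlen : (PySem.Chars.splitOnMax (PySem.Chars.strip line) [':'] 1).length = 2 := by
        rw [splitOnMax_one]; simp [hm]
      simp [hC, hlen, (isIn_single ':' _).mpr hm]
    · have hlen : (PySem.Chars.splitOnMax (PySem.Chars.strip line) [':'] 1).length = 1 := by
        rw [splitOnMax_one]; simp [hm]
      have hin : PySem.Chars.isIn [':'] (PySem.Chars.strip line) = false := by
        rw [Bool.eq_false_iff]
        intro hx; exact hm ((isIn_single ':' _).mp hx)
      simp [hC, hlen, hin]
  · simp [hC]

-- A's token list is the concatenation of gB over the lines
theorem Aparts_eq (lines : List (List Char)) :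
    ((PySem.Chars.splitOn (PySem.Chars.join (", ".toList)
      (lines.foldl (fun acc line =>
        let s := PySem.Chars.strip line
        let low := PySem.Chars.lower s
        if PySem.Chars.startswith low ("technologies used".toList)
            || PySem.Chars.startswith low ("skills:".toList)
            || PySem.Chars.startswith low ("tech stack".toList) then
          let parts := PySem.Chars.splitOnMax s [':'] 1
          if parts.length == 2 then acc ++ [PySem.Chars.strip (parts.getD 1 [])] else acc
        else acc) [])) [',']).map PySem.Chars.strip).filter (fun p => p ≠ [])
    = lines.flatMap gB := by
  have hA : (fun (acc : List (List Char)) (line : List Char) =>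
        let s := PySem.Chars.strip line
        let low := PySem.Chars.lower s
        if PySem.Chars.startswith low ("technologies used".toList)
            || PySem.Chars.startswith low ("skills:".toList)
            || PySem.Chars.startswith low ("tech stack".toList) then
          let parts := PySem.Chars.splitOnMax s [':'] 1
          if parts.length == 2 then acc ++ [PySem.Chars.strip (parts.getD 1 [])] else acc
        else acc)
      = (fun acc line => acc ++ fA line) := by
    funext acc line
    simp only [fA, lineCond]
    split_ifs <;> simp
  rw [hA, PySem.List.foldl_append_eq_flatMap]
  have h1 : ((PySem.Chars.splitOn (PySem.Chars.join (", ".toList)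
      (([] : List (List Char)) ++ lines.flatMap fA)) [',']).map PySem.Chars.strip).filter (fun p => p ≠ [])
      = tokensOf (PySem.Chars.join (", ".toList) (lines.flatMap fA)) := by
    simp [tokensOf, splitOn_single]
  rw [h1, tokensOf_join, List.flatMap_assoc]
  exact List.flatMap_congr (fun line _ => fA_tokens line)

-- B's per-token step and the state it maintains
def tokStep (st : List Char × List Char × Nat) (t : List Char) : List Char × List Char × Nat :=
  if st.2.2 < 5 then
    (if st.2.2 == 0 then t else st.1 ++ ", ".toList ++ t, st.2.1, st.2.2 + 1)
  else
    (st.1, if st.2.2 == 5 then t else st.2.1 ++ ", ".toList ++ t, st.2.2 + 1)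

def stateOf (vs : List (List Char)) : List Char × List Char × Nat :=
  (PySem.Chars.join (", ".toList) (vs.take 5),
   PySem.Chars.join (", ".toList) (vs.drop 5), vs.length)

theorem join_snoc (xs : List (List Char)) (u : List Char) :
    PySem.Chars.join (", ".toList) (xs ++ [u]) =
      if xs = [] then u else PySem.Chars.join (", ".toList) xs ++ ", ".toList ++ u := by
  induction xs with
  | nil => simp [PySem.Chars.join, List.intercalate]
  | cons x xs ih =>
    cases xs with
    | nil => simp [PySem.Chars.join, List.intercalate]
    | cons y ys =>
      have h1 : (x :: y :: ys) ++ [u] = x :: ((y :: ys) ++ [u]) := rfl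
      rw [h1]
      obtain ⟨z, zs, hz⟩ : ∃ z zs, (y :: ys) ++ [u] = z :: zs := ⟨y, ys ++ [u], rfl⟩
      rw [hz, PySem.Chars.join_cons_cons, ← hz, ih]
      simp [PySem.Chars.join_cons_cons, List.append_assoc]

theorem tokStep_stateOf (vs : List (List Char)) (u : List Char) :
    tokStep (stateOf vs) u = stateOf (vs ++ [u]) := by
  unfold tokStep stateOf
  by_cases h : vs.length < 5
  · have ht : (vs ++ [u]).take 5 = vs ++ [u] := by
      rw [List.take_of_length_le]; simp; omega
    have ht' : vs.take 5 = vs := List.take_of_length_le (by omega)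
    have hd : (vs ++ [u]).drop 5 = [] := by
      rw [List.drop_eq_nil_iff]; simp; omega
    have hd' : vs.drop 5 = [] := by rw [List.drop_eq_nil_iff]; omega
    simp only [h, if_pos, ht, ht', hd, hd', join_snoc]
    by_cases h0 : vs = []
    · subst h0; simp
    · have : (vs.length == 0) = false := by
        simp [List.length_eq_zero_iff]; exact h0
      simp [this, h0]
  · have h5 : 5 ≤ vs.length := by omega
    have ht : (vs ++ [u]).take 5 = vs.take 5 := List.take_append_of_le_length h5
    have hd : (vs ++ [u]).drop 5 = vs.drop 5 ++ [u] := List.drop_append_of_le_length h5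
    simp only [h, ht, hd, join_snoc]
    by_cases h0 : vs.length = 5
    · have : vs.drop 5 = [] := by rw [List.drop_eq_nil_iff]; omega
      simp [h0, this]
    · have hne : vs.drop 5 ≠ [] := by
        rw [Ne, List.drop_eq_nil_iff]; omega
      have : (vs.length == 5) = false := by simp [h0]
      simp [this, hne]

theorem foldl_tokStep_stateOf (ts : List (List Char)) :
    ∀ vs, ts.foldl tokStep (stateOf vs) = stateOf (vs ++ ts) := by
  induction ts with
  | nil => intro vs; simp
  | cons t ts ih =>
    intro vs
    rw [List.foldl_cons, tokStep_stateOf, ih (vs ++ [t])]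
    simp

-- the inner loop over raw comma pieces is tokStep over the tokenised tail
theorem foldl_pieces_eq (l : List (List Char)) :
    ∀ st, l.foldl (fun st tok =>
        let t := PySem.Chars.strip tok
        if t ≠ [] then tokStep st t else st) st
      = ((l.map PySem.Chars.strip).filter (fun p => p ≠ [])).foldl tokStep st := by
  induction l with
  | nil => intro st; rfl
  | cons x l ih =>
    intro st
    rw [List.foldl_cons, ih, List.map_cons, List.filter_cons]
    by_cases hx : PySem.Chars.strip x = []
    · simp [hx]
    · simp [hx]

-- B's whole loop, as tokStep folded over the concatenated token stream
theorem Bfold_eq (lines : List (List Char)) :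
    ∀ st, lines.foldl (fun st line =>
      let s := PySem.Chars.strip line
      let low := PySem.Chars.lower s
      if (PySem.Chars.startswith low ("technologies used".toList)
          || PySem.Chars.startswith low ("skills:".toList)
          || PySem.Chars.startswith low ("tech stack".toList))
          && PySem.Chars.isIn [':'] s then
        (PySem.Chars.splitOn
            (PySem.Chars.strip ((PySem.Chars.splitOnMax s [':'] 1).getD 1 [])) [',']).foldl
          (fun st tok =>
            let t := PySem.Chars.strip tok
            if t ≠ [] then
              if st.2.2 < 5 then
                (if st.2.2 == 0 then t else st.1 ++ ", ".toList ++ t, st.2.1, st.2.2 + 1)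
              else
                (st.1, if st.2.2 == 5 then t else st.2.1 ++ ", ".toList ++ t, st.2.2 + 1)
            else st) st
      else st) st
    = (lines.flatMap gB).foldl tokStep st := by
  induction lines with
  | nil => intro st; rfl
  | cons line lines ih =>
    intro st
    rw [List.foldl_cons, List.flatMap_cons, List.foldl_append, ← ih]
    congr 1
    simp only [gB, lineCond]
    by_cases hC : (PySem.Chars.startswith (PySem.Chars.lower (PySem.Chars.strip line)) ("technologies used".toList)
          || PySem.Chars.startswith (PySem.Chars.lower (PySem.Chars.strip line)) ("skills:".toList)
          || PySem.Chars.startswith (PySem.Chars.lower (PySem.Chars.strip line)) ("tech stack".toList))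
          && PySem.Chars.isIn [':'] (PySem.Chars.strip line)
    · have hfun : (fun st tok =>
            let t := PySem.Chars.strip tok
            if t ≠ [] then
              if st.2.2 < 5 then
                (if st.2.2 == 0 then t else st.1 ++ ", ".toList ++ t, st.2.1, st.2.2 + 1)
              else
                (st.1, if st.2.2 == 5 then t else st.2.1 ++ ", ".toList ++ t, st.2.2 + 1)
            else st)
          = (fun (st : List Char × List Char × Nat) tok =>
            let t := PySem.Chars.strip tok
            if t ≠ [] then tokStep st t else st) := by
        funext st tok; simp [tokStep]
      rw [if_pos hC, if_pos hC, hfun, foldl_pieces_eq, splitOn_single]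
      simp only [tokensOf]
    · rw [if_neg hC, if_neg hC]
      simp

-- ===== VERDICT (by name: the statement is the Claim_ definition above) =====
theorem parse_skills_global_spec : Claim_equal_parse_skills_global := by
  intro text _
  unfold Spec_parse_skills_global parse_skills_global parse_skills_global_alt
  simp only []
  rw [Bfold_eq]
  have hst : (([], [], 0) : List Char × List Char × Nat) = stateOf [] := by
    simp [stateOf, PySem.Chars.join, List.intercalate]
  rw [hst, foldl_tokStep_stateOf, List.nil_append]
  have h5 : ((5:Int)).toNat = 5 := rfl
  rw [Aparts_eq, PySem.List.slice_to, PySem.List.slice_from] <;> norm_num [stateOf, h5]
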